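-- pv_equiv track=rewrite | github.com/MrBrantCode/unitest_baseline | mut_generate/mist_train_cf/cf_43838/solution.py | eradicate_three
-- ===== SOURCE A (Python) =====
-- def eradicate_three(mylist):
--     i = 0
--     while i < len(mylist):
--         if i < len(mylist) - 2 and sum(mylist[i:i+3]) == 3:
--             del mylist[i]
--         elif mylist[i] == 3:
--             del mylist[i]
--         else:
--             i += 1
--     return mylist
-- ===== SOURCE B (Python) =====
-- def eradicate_three(mylist):
--     # Single forward pass over the ORIGINAL list: the element at original
--     # index k is dropped iff k < n-2 and the original triple starting at k
--     # sums to 3, or the element equals 3.  (Valid because A only ever deletes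
--     # the head of the still-unprocessed suffix, which is always a contiguous
--     # suffix of the original list.)  Mutates mylist in place like A.
--     n = len(mylist)
--     out = []
--     for k, x in enumerate(mylist):
--         if k < n - 2 and x + mylist[k + 1] + mylist[k + 2] == 3:
--             continue
--         if x != 3:
--             out.append(x)
--     mylist[:] = out
--     return mylist
-- ===== Notes on version B (the rewrite author's own statement) =====
-- stated objective: faster
-- what changed: Replaced A's while loop with repeated in-place del (re-slicing and shifting the list on every deletion, O(n^2)) by a single forward pass over the original list that keeps element k iff it is not 3 and the original triple starting at k does not sum to 3, exploiting that A only ever deletes the head of the unprocessed suffix.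
import Mathlib
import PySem

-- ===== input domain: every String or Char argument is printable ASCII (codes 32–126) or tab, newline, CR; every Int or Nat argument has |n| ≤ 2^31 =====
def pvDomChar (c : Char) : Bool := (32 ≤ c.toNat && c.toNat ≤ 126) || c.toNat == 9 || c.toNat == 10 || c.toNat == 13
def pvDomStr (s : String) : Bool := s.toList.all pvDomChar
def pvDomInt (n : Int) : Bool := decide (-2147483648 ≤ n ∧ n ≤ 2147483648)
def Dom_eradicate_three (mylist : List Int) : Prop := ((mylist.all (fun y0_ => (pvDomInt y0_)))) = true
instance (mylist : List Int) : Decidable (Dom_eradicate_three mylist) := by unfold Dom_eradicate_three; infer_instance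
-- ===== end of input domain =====

-- B replaces A's quadratic in-place-deletion while loop by a single forward pass over the
-- original list (objective: faster, asymptotic). Both A and B mutate the argument in place
-- in Python; the equivalence proved here is about the return value.

-- ===== PORT A =====
-- while loop of A: state = (current list, current index); 'del mylist[i]' = eraseIdx i
-- (exact: i is a nonnegative in-range index whenever A deletes). fuel only bounds the
-- number of iterations to make the loop total; 2*len+1 always suffices (proved below).
def eradicateLoopA (fuel : Nat) (l : List Int) (i : Nat) : List Int :=
  match fuel with
  | 0 => l
  | fuel + 1 =>
    if i < l.length then
      if (i : Int) < (l.length : Int) - 2 ∧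
          (PySem.List.slice l (some (i : Int)) (some ((i : Int) + 3))).sum = 3 then
        eradicateLoopA fuel (l.eraseIdx i) i
      else if l.getD i 0 = 3 then  -- mylist[i]: in range since i < len(mylist)
        eradicateLoopA fuel (l.eraseIdx i) i
      else
        eradicateLoopA fuel l (i + 1)
    else l

def eradicate_three (mylist : List Int) : List Int := eradicateLoopA (2 * mylist.length + 1) mylist 0

-- ===== PORT B =====
-- B's for loop over enumerate(mylist), building 'out'; lookups mylist[k+1], mylist[k+2]
-- are guarded by k < n-2, hence in range (getD is exact there).
def eradicateGoB (orig : List Int) (k : Nat) : List Int → List Int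
  | [] => []
  | x :: rest =>
    if (k : Int) < (orig.length : Int) - 2 ∧ x + orig.getD (k + 1) 0 + orig.getD (k + 2) 0 = 3 then
      eradicateGoB orig (k + 1) rest
    else if x ≠ 3 then
      x :: eradicateGoB orig (k + 1) rest
    else
      eradicateGoB orig (k + 1) rest

def eradicate_three_alt (mylist : List Int) : List Int := eradicateGoB mylist 0 mylist

-- ===== PRECONDITION & SPEC =====
def Spec_eradicate_three (mylist : List Int) (out : List Int) : Prop := out = eradicate_three_alt mylist
instance (mylist : List Int) (out : List Int) : Decidable (Spec_eradicate_three mylist out) := by unfold Spec_eradicate_three; infer_instance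

-- ===== CLAIM (what is proved, stated in full; the proofs are below) =====
def Claim_equal_eradicate_three : Prop := ∀ (mylist : List Int), Dom_eradicate_three mylist → Spec_eradicate_three mylist (eradicate_three mylist)

-- ===== LEMMAS AND PROOFS =====

-- pure suffix form of A's loop
def gSuffix : List Int → List Int
  | [] => []
  | a :: s =>
    if (2 ≤ s.length ∧ a + s.getD 0 0 + s.getD 1 0 = 3) ∨ a = 3 then gSuffix s
    else a :: gSuffix s

lemma eraseIdx_mid (kept : List Int) (a : Int) (s : List Int) :
    (kept ++ a :: s).eraseIdx kept.length = kept ++ s := by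
  induction kept with
  | nil => simp
  | cons h t ih => simp [ih]

lemma slice_mid (kept : List Int) (a : Int) (s : List Int) :
    PySem.List.slice (kept ++ a :: s) (some (kept.length : Int))
      (some ((kept.length : Int) + 3)) = (a :: s).take 3 := by
  have h := PySem.List.slice_natCast_add (xs := kept ++ a :: s) (j := kept.length) (n := 3)
  simpa [List.drop_append_of_le_length] using h

lemma loopA_eq_gSuffix (s kept : List Int) (fuel : Nat) (hf : 2 * s.length + 1 ≤ fuel) :
    eradicateLoopA fuel (kept ++ s) kept.length = kept ++ gSuffix s := by
  induction s generalizing kept fuel with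
  | nil =>
    obtain ⟨f, rfl⟩ : ∃ f, fuel = f + 1 := ⟨fuel - 1, by omega⟩
    rw [eradicateLoopA]; simp [gSuffix]
  | cons a s ih =>
    obtain ⟨f, rfl⟩ : ∃ f, fuel = f + 1 := ⟨fuel - 1, by omega⟩
    have hfs : 2 * s.length + 1 ≤ f := by simp at hf; omega
    rw [eradicateLoopA]
    have hlt : kept.length < (kept ++ a :: s).length := by simp
    rw [if_pos hlt, slice_mid]
    by_cases h1 : (kept.length : Int) < ((kept ++ a :: s).length : Int) - 2 ∧
        ((a :: s).take 3).sum = 3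
    · rw [if_pos h1, eraseIdx_mid, ih _ _ hfs]
      have hs2 : 2 ≤ s.length := by
        have := h1.1; simp at this; omega
      have hsum : a + s.getD 0 0 + s.getD 1 0 = 3 := by
        match s, hs2 with
        | b :: c :: s', _ =>
          have := h1.2
          simp [List.take] at this ⊢
          linarith
      rw [gSuffix, if_pos (Or.inl ⟨hs2, hsum⟩)]
    · rw [if_neg h1]
      have hget : (kept ++ a :: s).getD kept.length 0 = a := by
        simp [List.getD]
      rw [hget]
      by_cases h2 : a = 3
      · rw [if_pos h2, eraseIdx_mid, ih _ _ hfs, gSuffix, if_pos (Or.inr h2)]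
      · rw [if_neg h2]
        have hnot : ¬ ((2 ≤ s.length ∧ a + s.getD 0 0 + s.getD 1 0 = 3) ∨ a = 3) := by
          rintro (⟨hs2, hsum⟩ | h3)
          · apply h1
            constructor
            · simp; omega
            · match s, hs2 with
              | b :: c :: s', _ =>
                simp [List.take] at hsum ⊢
                linarith
          · exact h2 h3
        have hsplit : kept ++ a :: s = (kept ++ [a]) ++ s := by simp
        rw [hsplit]
        have hlen : kept.length + 1 = (kept ++ [a]).length := by simp
        rw [hlen, ih _ _ hfs, gSuffix, if_neg hnot]
        simp

lemma goB_eq_gSuffix (orig : List Int) (k : Nat) (hk : k ≤ orig.length) :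
    eradicateGoB orig k (orig.drop k) = gSuffix (orig.drop k) := by
  induction hn : orig.length - k generalizing k with
  | zero =>
    have : orig.drop k = [] := List.drop_eq_nil_iff.mpr (by omega)
    simp [this, eradicateGoB, gSuffix]
  | succ n ih =>
    obtain ⟨a, s, hs⟩ : ∃ a s, orig.drop k = a :: s := by
      cases hd : orig.drop k with
      | nil => exact absurd (List.drop_eq_nil_iff.mp hd) (by omega)
      | cons a s => exact ⟨a, s, rfl⟩
    have hs' : orig.drop (k + 1) = s := by
      have h := congrArg List.tail hs
      simpa [List.tail_drop] using h
    have hslen : s.length = orig.length - (k + 1) := by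
      have h := List.length_drop (l := orig) (i := k + 1); rw [hs'] at h; omega
    have hg1 : orig.getD (k + 1) 0 = s.getD 0 0 := by
      rw [← hs']; simp [List.getD, List.getElem?_drop]
    have hg2 : orig.getD (k + 2) 0 = s.getD 1 0 := by
      rw [← hs']; simp [List.getD, List.getElem?_drop]
    have hcond : ((k : Int) < (orig.length : Int) - 2) ↔ 2 ≤ s.length := by
      rw [hslen]; omega
    have htail : eradicateGoB orig (k + 1) s = gSuffix s := by
      rw [← hs']; exact ih (k + 1) (by omega) (by omega)
    rw [hs, eradicateGoB, gSuffix]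
    by_cases hc1 : (k : Int) < (orig.length : Int) - 2 ∧
        a + orig.getD (k + 1) 0 + orig.getD (k + 2) 0 = 3
    · rw [if_pos hc1,
        if_pos (Or.inl ⟨hcond.mp hc1.1, by rw [← hg1, ← hg2]; exact hc1.2⟩), htail]
    · rw [if_neg hc1]
      by_cases h3 : a = 3
      · rw [if_neg (show ¬ a ≠ 3 by simpa using h3), if_pos (Or.inr h3), htail]
      · have hnot : ¬ ((2 ≤ s.length ∧ a + s.getD 0 0 + s.getD 1 0 = 3) ∨ a = 3) := by
          rintro (⟨h2, hsum⟩ | hA)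
          · exact hc1 ⟨hcond.mpr h2, by rw [hg1, hg2]; exact hsum⟩
          · exact h3 hA
        rw [if_pos h3, if_neg hnot, htail]

-- ===== VERDICT (by name: the statement is the Claim_ definition above) =====
theorem eradicate_three_spec : Claim_equal_eradicate_three := by
  intro mylist _
  unfold Spec_eradicate_three eradicate_three eradicate_three_alt
  have h1 := loopA_eq_gSuffix mylist [] (2 * mylist.length + 1) (by omega)
  have h2 := goB_eq_gSuffix mylist 0 (by omega)
  simp at h1 h2
  rw [h1, h2]
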